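-- pv_equiv track=rewrite | github.com/iam-nont/ROC | parse_iteminfo.py | decode_lua_string
-- ===== SOURCE A (Python) =====
-- def decode_lua_string(s):
--     """Decode a Lua string with decimal escapes to a proper string.
--     Lua uses DECIMAL escapes like \\185 (not octal).
--     These represent CP874 (Thai) encoded bytes.
--     Regular ASCII chars pass through directly.
--     """
--     result = bytearray()
--     i = 0
--     while i < len(s):
--         if s[i] == '\\' and i + 1 < len(s) and s[i + 1].isdigit():
--             # Lua decimal escape sequence (1-3 digits)
--             j = i + 1
--             while j < len(s) and j < i + 4 and s[j].isdigit():
--                 j += 1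
--             val = int(s[i + 1:j])  # Decimal, not octal!
--             if val > 255:
--                 val = val & 0xFF
--             result.append(val)
--             i = j
--         elif s[i] == '\\' and i + 1 < len(s):
--             # Other escape sequences
--             esc = s[i + 1]
--             if esc == 'n':
--                 result.append(ord('\n'))
--             elif esc == 't':
--                 result.append(ord('\t'))
--             elif esc == 'r':
--                 result.append(ord('\r'))
--             elif esc == '\\':
--                 result.append(ord('\\'))
--             elif esc == '"':
--                 result.append(ord('"'))
--             elif esc == "'":
--                 result.append(ord("'"))
--             else:
--                 result.append(ord(s[i]))
--                 result.append(ord(esc))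
--             i += 2
--         else:
--             result.append(ord(s[i]))
--             i += 1
--     try:
--         return result.decode('cp874', errors='replace')
--     except Exception:
--         return result.decode('latin-1', errors='replace')
-- ===== SOURCE B (Python) =====
-- import re
--
-- _ESC = {'n': 10, 't': 9, 'r': 13, '\\': 92, '"': 34, "'": 39}
-- _TOKEN = re.compile(r'\\([0-9]{1,3})|\\(.)|(.)', re.DOTALL)
--
-- def decode_lua_string(s):
--     """Decode a Lua string with decimal escapes to a proper string (regex scan)."""
--     out = bytearray()
--     for m in _TOKEN.finditer(s):
--         dec, esc, lit = m.groups()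
--         if dec is not None:
--             out.append(int(dec) % 256)
--         elif esc is not None:
--             b = _ESC.get(esc)
--             if b is not None:
--                 out.append(b)
--             else:
--                 out.append(92)
--                 out.append(ord(esc))
--         else:
--             out.append(ord(lit))
--     return out.decode('cp874', errors='replace')
-- ===== Notes on version B (the rewrite author's own statement) =====
-- stated objective: idiomatic
-- what changed: Replaced the manual index-stepping while-loop (inner digit-counting loop plus elif chain) by a single compiled-regex scan whose alternation (decimal escape | simple escape | literal char) drives a dict-based byte emitter, with the codec ported as a charmap table lookup instead of per-byte case analysis.
import Mathlib
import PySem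

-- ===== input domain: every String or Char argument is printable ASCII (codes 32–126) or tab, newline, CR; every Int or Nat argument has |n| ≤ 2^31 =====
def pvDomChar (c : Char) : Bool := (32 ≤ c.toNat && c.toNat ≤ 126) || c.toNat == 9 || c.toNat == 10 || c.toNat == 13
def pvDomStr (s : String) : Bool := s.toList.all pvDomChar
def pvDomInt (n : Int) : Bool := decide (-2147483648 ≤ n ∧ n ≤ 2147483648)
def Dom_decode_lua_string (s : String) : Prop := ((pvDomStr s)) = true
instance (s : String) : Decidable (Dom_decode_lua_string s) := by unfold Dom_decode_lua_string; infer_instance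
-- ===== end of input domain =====

-- B replaces A's manual index-stepping loop by a regex-style token scan (decimal escape | simple escape | literal)
-- and decodes bytes through a charmap table instead of A's per-byte case analysis; same O(n) cost, same value.

-- ===== PORT A =====

-- the cp874 codec (Python's bytes.decode('cp874', errors='replace')): bytes < 128 are ASCII,
-- unmapped high bytes become U+FFFD; the case analysis below is codecs cp874 verbatim.
def cp874Char (b : Nat) : Char :=
  if b < 128 then Char.ofNat b else
  match b with
  | 128 => Char.ofNat 8364
  | 133 => Char.ofNat 8230
  | 145 => Char.ofNat 8216
  | 146 => Char.ofNat 8217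
  | 147 => Char.ofNat 8220
  | 148 => Char.ofNat 8221
  | 149 => Char.ofNat 8226
  | 150 => Char.ofNat 8211
  | 151 => Char.ofNat 8212
  | 160 => Char.ofNat 160
  | 161 => Char.ofNat 3585
  | 162 => Char.ofNat 3586
  | 163 => Char.ofNat 3587
  | 164 => Char.ofNat 3588
  | 165 => Char.ofNat 3589
  | 166 => Char.ofNat 3590
  | 167 => Char.ofNat 3591
  | 168 => Char.ofNat 3592
  | 169 => Char.ofNat 3593
  | 170 => Char.ofNat 3594
  | 171 => Char.ofNat 3595
  | 172 => Char.ofNat 3596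
  | 173 => Char.ofNat 3597
  | 174 => Char.ofNat 3598
  | 175 => Char.ofNat 3599
  | 176 => Char.ofNat 3600
  | 177 => Char.ofNat 3601
  | 178 => Char.ofNat 3602
  | 179 => Char.ofNat 3603
  | 180 => Char.ofNat 3604
  | 181 => Char.ofNat 3605
  | 182 => Char.ofNat 3606
  | 183 => Char.ofNat 3607
  | 184 => Char.ofNat 3608
  | 185 => Char.ofNat 3609
  | 186 => Char.ofNat 3610
  | 187 => Char.ofNat 3611
  | 188 => Char.ofNat 3612
  | 189 => Char.ofNat 3613
  | 190 => Char.ofNat 3614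
  | 191 => Char.ofNat 3615
  | 192 => Char.ofNat 3616
  | 193 => Char.ofNat 3617
  | 194 => Char.ofNat 3618
  | 195 => Char.ofNat 3619
  | 196 => Char.ofNat 3620
  | 197 => Char.ofNat 3621
  | 198 => Char.ofNat 3622
  | 199 => Char.ofNat 3623
  | 200 => Char.ofNat 3624
  | 201 => Char.ofNat 3625
  | 202 => Char.ofNat 3626
  | 203 => Char.ofNat 3627
  | 204 => Char.ofNat 3628
  | 205 => Char.ofNat 3629
  | 206 => Char.ofNat 3630
  | 207 => Char.ofNat 3631
  | 208 => Char.ofNat 3632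
  | 209 => Char.ofNat 3633
  | 210 => Char.ofNat 3634
  | 211 => Char.ofNat 3635
  | 212 => Char.ofNat 3636
  | 213 => Char.ofNat 3637
  | 214 => Char.ofNat 3638
  | 215 => Char.ofNat 3639
  | 216 => Char.ofNat 3640
  | 217 => Char.ofNat 3641
  | 218 => Char.ofNat 3642
  | 223 => Char.ofNat 3647
  | 224 => Char.ofNat 3648
  | 225 => Char.ofNat 3649
  | 226 => Char.ofNat 3650
  | 227 => Char.ofNat 3651
  | 228 => Char.ofNat 3652
  | 229 => Char.ofNat 3653
  | 230 => Char.ofNat 3654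
  | 231 => Char.ofNat 3655
  | 232 => Char.ofNat 3656
  | 233 => Char.ofNat 3657
  | 234 => Char.ofNat 3658
  | 235 => Char.ofNat 3659
  | 236 => Char.ofNat 3660
  | 237 => Char.ofNat 3661
  | 238 => Char.ofNat 3662
  | 239 => Char.ofNat 3663
  | 240 => Char.ofNat 3664
  | 241 => Char.ofNat 3665
  | 242 => Char.ofNat 3666
  | 243 => Char.ofNat 3667
  | 244 => Char.ofNat 3668
  | 245 => Char.ofNat 3669
  | 246 => Char.ofNat 3670
  | 247 => Char.ofNat 3671
  | 248 => Char.ofNat 3672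
  | 249 => Char.ofNat 3673
  | 250 => Char.ofNat 3674
  | 251 => Char.ofNat 3675
  | _ => Char.ofNat 65533   -- undefined in cp874; errors='replace'

-- int(<digit string>) for the 1-3 digit escape substring (exact: the slice contains only '0'-'9')
def digitsVal (ds : List Char) : Nat := ds.foldl (fun a c => a * 10 + (c.toNat - 48)) 0

-- A's while-loop over index i, as recursion on the remaining suffix; the inner
-- digit-scanning while (at most 3 digits, j < i + 4) is unrolled into its three bounded steps.
def decodeBytesA : List Char → List Nat
  | [] => []
  | c :: rest =>
    if c = '\\' then
      match rest with
      | [] => c.toNat :: decodeBytesA []          -- i + 1 < len(s) fails: final else branch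
      | e :: r2 =>
        if PySem.Chars.isdigit e then
          match r2 with
          | [] => (let v := digitsVal [e]; if v > 255 then v &&& 255 else v) :: decodeBytesA []
          | d2 :: r3 =>
            if PySem.Chars.isdigit d2 then
              match r3 with
              | [] => (let v := digitsVal [e, d2]; if v > 255 then v &&& 255 else v) :: decodeBytesA []
              | d3 :: r4 =>
                if PySem.Chars.isdigit d3 then
                  (let v := digitsVal [e, d2, d3]; if v > 255 then v &&& 255 else v) :: decodeBytesA r4
                else (let v := digitsVal [e, d2]; if v > 255 then v &&& 255 else v) :: decodeBytesA (d3 :: r4)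
            else (let v := digitsVal [e]; if v > 255 then v &&& 255 else v) :: decodeBytesA (d2 :: r3)
        else if e = 'n' then 10 :: decodeBytesA r2
        else if e = 't' then 9 :: decodeBytesA r2
        else if e = 'r' then 13 :: decodeBytesA r2
        else if e = '\\' then 92 :: decodeBytesA r2
        else if e = '"' then 34 :: decodeBytesA r2
        else if e = '\'' then 39 :: decodeBytesA r2
        else c.toNat :: e.toNat :: decodeBytesA r2
    else c.toNat :: decodeBytesA rest
termination_by l => l.length
decreasing_by all_goals (simp only [List.length_cons]; omega)

-- the try/except latin-1 fallback in A is unreachable: decoding with errors='replace' never raises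
def decode_lua_string (s : String) : String :=
  String.ofList ((decodeBytesA s.toList).map cp874Char)

-- ===== PORT B =====

-- the cp874 codec as Source B's bytes.decode uses it, in charmap form: the decoding table
-- for the high half (bytes 128..255), undefined positions already holding U+FFFD.
def cp874Tab : List Nat :=
  [8364, 65533, 65533, 65533, 65533, 8230, 65533, 65533, 65533, 65533, 65533, 65533,
   65533, 65533, 65533, 65533, 65533, 8216, 8217, 8220, 8221, 8226, 8211, 8212,
   65533, 65533, 65533, 65533, 65533, 65533, 65533, 65533, 160, 3585, 3586, 3587,
   3588, 3589, 3590, 3591, 3592, 3593, 3594, 3595, 3596, 3597, 3598, 3599, 3600,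
   3601, 3602, 3603, 3604, 3605, 3606, 3607, 3608, 3609, 3610, 3611, 3612, 3613,
   3614, 3615, 3616, 3617, 3618, 3619, 3620, 3621, 3622, 3623, 3624, 3625, 3626,
   3627, 3628, 3629, 3630, 3631, 3632, 3633, 3634, 3635, 3636, 3637, 3638, 3639,
   3640, 3641, 3642, 65533, 65533, 65533, 65533, 3647, 3648, 3649, 3650, 3651, 3652,
   3653, 3654, 3655, 3656, 3657, 3658, 3659, 3660, 3661, 3662, 3663, 3664, 3665,
   3666, 3667, 3668, 3669, 3670, 3671, 3672, 3673, 3674, 3675, 65533, 65533, 65533, 65533]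

def cp874CharB (b : Nat) : Char :=
  if b < 128 then Char.ofNat b else Char.ofNat (cp874Tab.getD (b - 128) 65533)

-- Source B's _ESC dict lookup followed by the two-byte default (a fixed literal dict, ported as its lookup chain)
def escBytesB (e : Char) : List Nat :=
  if e = 'n' then [10]
  else if e = 't' then [9]
  else if e = 'r' then [13]
  else if e = '\\' then [92]
  else if e = '"' then [34]
  else if e = '\'' then [39]
  else [92, e.toNat]

-- Source B's int(dec) % 256
def decVal (ds : List Char) : Nat :=
  (ds.foldl (fun a c => a * 10 + (c.toNat - 48)) 0) % 256

-- Source B's regex scan: at each point the alternation \\[0-9]{1,3} | \\. | . picks the next token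
def decodeBytesB : List Char → List Nat
  | [] => []
  | '\\' :: rest =>
    let ds := (rest.takeWhile PySem.Chars.isdigit).take 3   -- greedy [0-9]{1,3}
    if ds.isEmpty then
      match rest with
      | [] => [92]                                          -- lone trailing backslash: matched by the '.' branch
      | e :: r2 => escBytesB e ++ decodeBytesB r2
    else decVal ds :: decodeBytesB (rest.drop ds.length)
  | c :: rest => c.toNat :: decodeBytesB rest
termination_by l => l.length
decreasing_by all_goals (simp only [List.length_cons, List.length_drop]; omega)

def decode_lua_string_alt (s : String) : String :=
  String.ofList ((decodeBytesB s.toList).map cp874CharB)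

-- ===== PRECONDITION & SPEC =====
def Spec_decode_lua_string (s : String) (out : String) : Prop := out = decode_lua_string_alt s
instance (s : String) (out : String) : Decidable (Spec_decode_lua_string s out) := by unfold Spec_decode_lua_string; infer_instance

-- ===== CLAIM (what is proved, stated in full; the proofs are below) =====
def Claim_equal_decode_lua_string : Prop := ∀ (s : String), Dom_decode_lua_string s → Spec_decode_lua_string s (decode_lua_string s)

-- ===== LEMMAS AND PROOFS =====

theorem and255_eq_mod (n : Nat) : n &&& 255 = n % 256 := by
  have h8 : (255 : Nat) = 2 ^ 8 - 1 := rfl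
  rw [h8, Nat.and_two_pow_sub_one_eq_mod]

theorem digitsVal_eq (ds : List Char) : decVal ds = digitsVal ds % 256 := rfl

-- A's emitted value for a digit run equals B's: &255 vs %256, and ≤255 values pass through mod unchanged
theorem aval_eq (ds : List Char) :
    (if digitsVal ds > 255 then digitsVal ds &&& 255 else digitsVal ds) = decVal ds := by
  rw [digitsVal_eq, ← and255_eq_mod]
  by_cases h : digitsVal ds > 255
  · simp [h]
  · have hlt : digitsVal ds < 256 := by omega
    simp only [if_neg h]
    rw [and255_eq_mod]
    exact (Nat.mod_eq_of_lt hlt).symm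

theorem bytes_eq : ∀ l, decodeBytesA l = decodeBytesB l := by
  intro l
  fun_induction decodeBytesA l
  all_goals (try (simp_all [decodeBytesB, escBytesB, aval_eq]))

theorem dom_lt (c : Char) (h : pvDomChar c = true) : c.toNat < 256 := by
  simp only [pvDomChar, Bool.or_eq_true, Bool.and_eq_true, beq_iff_eq,
    decide_eq_true_eq] at h
  omega

theorem domByte (l : List Char) :
    (∀ c ∈ l, pvDomChar c = true) → ∀ b ∈ decodeBytesA l, b < 256 := by
  fun_induction decodeBytesA l
  all_goals intro h b hb
  all_goals try exact absurd hb (List.not_mem_nil)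
  all_goals rename_i ih
  all_goals simp only [List.mem_cons] at hb
  all_goals rcases hb with rfl | hb
  all_goals try rcases hb with rfl | hb
  all_goals try exact ih (fun c hc => h c (by simp [hc])) b hb
  all_goals first
    | omega
    | (simp only [aval_eq]; unfold decVal; exact Nat.mod_lt _ (by omega))
    | (exact dom_lt _ (h _ (by simp)))

set_option maxRecDepth 8192 in
theorem tbl_eq (b : Nat) (h : b < 256) : cp874Char b = cp874CharB b := by
  have hall : ∀ x ∈ List.range 256, cp874Char x = cp874CharB x := by decide
  exact hall b (List.mem_range.mpr h)

theorem decode_lua_string_spec : Claim_equal_decode_lua_string := by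
  intro s hd
  unfold Spec_decode_lua_string decode_lua_string decode_lua_string_alt
  rw [bytes_eq]
  refine congrArg String.ofList (List.map_congr_left (fun b hb => tbl_eq b ?_))
  rw [← bytes_eq] at hb
  unfold Dom_decode_lua_string pvDomStr at hd
  exact domByte s.toList (List.all_eq_true.mp hd) b hb
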